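-- pv_equiv track=rewrite | github.com/rserrar/bia | ops/scripts/probe_openai_models.py | _limit_headers
-- ===== SOURCE A (Python) =====
-- def _limit_headers(headers: dict[str, str]) -> dict[str, str]:
--     out: dict[str, str] = {}
--     keys = [
--         "x-ratelimit-limit-requests",
--         "x-ratelimit-remaining-requests",
--         "x-ratelimit-reset-requests",
--         "x-ratelimit-limit-tokens",
--         "x-ratelimit-remaining-tokens",
--         "x-ratelimit-reset-tokens",
--         "retry-after",
--     ]
--     normalized = {k.lower(): v for k, v in headers.items()}
--     for key in keys:
--         if key in normalized:
--             out[key] = normalized[key]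
--     return out
-- ===== SOURCE B (Python) =====
-- _RANK = {
--     "x-ratelimit-limit-requests": 0,
--     "x-ratelimit-remaining-requests": 1,
--     "x-ratelimit-reset-requests": 2,
--     "x-ratelimit-limit-tokens": 3,
--     "x-ratelimit-remaining-tokens": 4,
--     "x-ratelimit-reset-tokens": 5,
--     "retry-after": 6,
-- }
--
--
-- def _limit_headers(headers: dict[str, str]) -> dict[str, str]:
--     # One membership-filtered pass (last occurrence wins via dict overwrite),
--     # then order the few found entries by the canonical key rank.
--     found: dict[str, str] = {}
--     for k, v in headers.items():
--         lk = k.lower()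
--         if lk in _RANK:
--             found[lk] = v
--     return dict(sorted(found.items(), key=lambda kv: _RANK[kv[0]]))
-- ===== Notes on version B (the rewrite author's own statement) =====
-- stated objective: alternative
-- what changed: B replaces A's build-full-lowercased-index-then-scan-fixed-keys with a single membership-filtered pass over the headers (keeping only rate-limit keys, last occurrence winning via dict overwrite) followed by a sort of the at-most-seven found entries by a fixed key rank.
import Mathlib
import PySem

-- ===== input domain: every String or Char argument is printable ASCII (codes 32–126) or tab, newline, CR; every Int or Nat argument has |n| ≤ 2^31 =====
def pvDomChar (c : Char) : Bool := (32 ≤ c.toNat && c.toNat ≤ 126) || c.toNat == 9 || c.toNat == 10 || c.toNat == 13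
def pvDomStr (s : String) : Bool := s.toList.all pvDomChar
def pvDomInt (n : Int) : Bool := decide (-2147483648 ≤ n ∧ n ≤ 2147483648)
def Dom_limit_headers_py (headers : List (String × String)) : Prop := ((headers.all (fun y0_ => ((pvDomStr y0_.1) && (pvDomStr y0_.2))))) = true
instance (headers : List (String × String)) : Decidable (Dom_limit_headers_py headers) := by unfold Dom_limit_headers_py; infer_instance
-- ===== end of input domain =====

-- ===== PORT A =====
-- B makes a single membership-filtered pass over the headers and then sorts the few found
-- entries by a fixed key rank, instead of A's full lowercased index plus fixed-key scan
-- (objective: alternative decomposition, no speed claim).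
def pvKeysA : List String :=
  [ "x-ratelimit-limit-requests",
    "x-ratelimit-remaining-requests",
    "x-ratelimit-reset-requests",
    "x-ratelimit-limit-tokens",
    "x-ratelimit-remaining-tokens",
    "x-ratelimit-reset-tokens",
    "retry-after" ]

def limit_headers_py (headers : List (String × String)) : List (String × String) :=
  -- normalized = {k.lower(): v for k, v in headers.items()}
  let normalized : PySem.Dict String String :=
    headers.foldl (fun d p => d.insert (PySem.Str.lower p.1) p.2) PySem.Dict.empty
  -- for key in keys: if key in normalized: out[key] = normalized[key]
  let out : PySem.Dict String String :=
    pvKeysA.foldl (fun out key =>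
      if normalized.contains key then out.insert key (normalized.getD key "") else out)
      PySem.Dict.empty
  out.items

-- ===== PORT B =====
-- _RANK = {"x-ratelimit-limit-requests": 0, …, "retry-after": 6}
def pvRank : PySem.Dict String Int :=
  PySem.Dict.ofList
    [ ("x-ratelimit-limit-requests", 0),
      ("x-ratelimit-remaining-requests", 1),
      ("x-ratelimit-reset-requests", 2),
      ("x-ratelimit-limit-tokens", 3),
      ("x-ratelimit-remaining-tokens", 4),
      ("x-ratelimit-reset-tokens", 5),
      ("retry-after", 6) ]

def limit_headers_py_alt (headers : List (String × String)) : List (String × String) :=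
  -- for k, v in headers.items(): lk = k.lower(); if lk in _RANK: found[lk] = v
  let found : PySem.Dict String String :=
    headers.foldl (fun d p =>
      let lk := PySem.Str.lower p.1
      if pvRank.contains lk then d.insert lk p.2 else d) PySem.Dict.empty
  -- return dict(sorted(found.items(), key=lambda kv: _RANK[kv[0]]))
  -- every key of found is a key of _RANK, so _RANK[kv[0]] never raises; getD's default is unreachable
  (PySem.Dict.ofList
    (PySem.List.sorted found.items (fun kv => pvRank.getD kv.1 0))).items

-- ===== PRECONDITION & SPEC =====
def Spec_limit_headers_py (headers : List (String × String)) (out : List (String × String)) : Prop := out = limit_headers_py_alt headers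
instance (headers : List (String × String)) (out : List (String × String)) : Decidable (Spec_limit_headers_py headers out) := by unfold Spec_limit_headers_py; infer_instance

-- ===== CLAIM (what is proved, stated in full; the proofs are below) =====
def Claim_equal_limit_headers_py : Prop := ∀ (headers : List (String × String)), Dom_limit_headers_py headers → Spec_limit_headers_py headers (limit_headers_py headers)

-- ===== LEMMAS AND PROOFS =====

-- A's normalized-dict lookup at key is the last header whose lowercased name is key,
-- with the start dict d as fallback.
theorem get?_fold_insert_lower (headers : List (String × String))
    (d : PySem.Dict String String) (key : String) :
    (headers.foldl (fun d p => d.insert (PySem.Str.lower p.1) p.2) d).get? key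
      = (match headers.reverse.find? (fun p => PySem.Str.lower p.1 == key) with
         | some p => some p.2
         | none => d.get? key) := by
  induction headers generalizing d with
  | nil => simp
  | cons h t ih =>
    simp only [List.foldl_cons, List.reverse_cons, List.find?_append]
    rw [ih]
    cases hf : t.reverse.find? (fun p => PySem.Str.lower p.1 == key) with
    | some p => simp
    | none =>
      simp only [List.find?_singleton]
      by_cases hk : PySem.Str.lower h.1 = key
      · simp [hk, PySem.Dict.get?_insert_self]
      · simp [hk, PySem.Dict.get?_insert_of_ne _ _ (Ne.symm hk)]

-- B's filtered one-pass dict: same last-match lookup, gated by _RANK membership.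
theorem get?_fold_filtered (headers : List (String × String))
    (d : PySem.Dict String String) (key : String) :
    (headers.foldl (fun d p =>
        let lk := PySem.Str.lower p.1
        if pvRank.contains lk then d.insert lk p.2 else d) d).get? key
      = (if pvRank.contains key then
           (match headers.reverse.find? (fun p => PySem.Str.lower p.1 == key) with
            | some p => some p.2
            | none => d.get? key)
         else d.get? key) := by
  induction headers generalizing d with
  | nil => simp
  | cons h t ih =>
    simp only [List.foldl_cons, List.reverse_cons, List.find?_append]
    rw [ih]
    cases hf : t.reverse.find? (fun p => PySem.Str.lower p.1 == key) with
    | some p =>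
      by_cases hr : pvRank.contains key = true
      · simp [hr]
      · simp only [hr]
        by_cases hl : pvRank.contains (PySem.Str.lower h.1) = true
        · have hne : key ≠ PySem.Str.lower h.1 := fun e => hr (e ▸ hl)
          simp [hl, PySem.Dict.get?_insert_of_ne _ _ hne]
        · simp [hl]
    | none =>
      simp only [List.find?_singleton]
      by_cases hk : PySem.Str.lower h.1 = key
      · subst hk
        by_cases hr : pvRank.contains (PySem.Str.lower h.1) = true <;>
          simp [hr, PySem.Dict.get?_insert_self]
      · by_cases hr : pvRank.contains (PySem.Str.lower h.1) = true <;>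
          by_cases hr' : pvRank.contains key = true <;>
          simp [hr, hr', hk, PySem.Dict.get?_insert_of_ne _ _ (Ne.symm hk)]

-- B's filtered pass keeps the keys distinct.
theorem nodup_keys_fold_filtered (headers : List (String × String))
    (d : PySem.Dict String String) (hd : d.keys.Nodup) :
    (headers.foldl (fun d p =>
        let lk := PySem.Str.lower p.1
        if pvRank.contains lk then d.insert lk p.2 else d) d).keys.Nodup := by
  induction headers generalizing d with
  | nil => exact hd
  | cons h t ih =>
    simp only [List.foldl_cons]
    by_cases hr : pvRank.contains (PySem.Str.lower h.1) = true
    · simp only [hr, if_true]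
      exact ih _ (PySem.Dict.nodup_keys_insert _ _ _ hd)
    · simp only [hr]
      exact ih _ hd

-- A's fixed-key emission loop over distinct fresh keys appends exactly the found keys in order.
theorem items_fold_emit (n : PySem.Dict String String) (keys : List String)
    (d : PySem.Dict String String) (hk : keys.Nodup)
    (hd : ∀ k ∈ keys, d.contains k = false) :
    (keys.foldl (fun out key =>
        if n.contains key then out.insert key (n.getD key "") else out) d).items
      = d.items ++ keys.filterMap (fun key => (n.get? key).map (fun v => (key, v))) := by
  induction keys generalizing d with
  | nil => simp
  | cons key rest ih =>
    simp only [List.foldl_cons, List.filterMap_cons]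
    cases hc : n.contains key with
    | false =>
      have hg : n.get? key = none := by
        have := PySem.Dict.contains_eq_isSome_get? n key
        rw [hc] at this
        exact Option.not_isSome_iff_eq_none.mp (by simp [← this])
      rw [if_neg (by simp), hg]
      simpa using ih d hk.of_cons (fun k hkm => hd k (List.mem_cons_of_mem _ hkm))
    | true =>
      obtain ⟨v, hv⟩ := Option.isSome_iff_exists.mp (by
        rw [← PySem.Dict.contains_eq_isSome_get? n key]; exact hc)
      have hgD : n.getD key "" = v := by
        rw [PySem.Dict.getD_eq_get?_getD, hv]; rfl
      have hfresh : ∀ k ∈ rest, (d.insert key v).contains k = false := by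
        intro k hkm
        rw [PySem.Dict.contains_insert]
        have hne : k ≠ key := fun e => (List.nodup_cons.mp hk).1 (e ▸ hkm)
        simp [hne, hd k (List.mem_cons_of_mem _ hkm)]
      rw [if_pos rfl, hgD, ih (d.insert key v) hk.of_cons hfresh, hv,
          PySem.Dict.items_insert_of_not_contains d v (hd key (by simp))]
      simp

-- _RANK's key set is exactly A's key list.
theorem contains_pvRank_iff (k : String) : pvRank.contains k = true ↔ k ∈ pvKeysA := by
  rw [PySem.Dict.contains_eq_decide_mem_keys]
  have hkeys : pvRank.keys = pvKeysA := by decide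
  rw [hkeys]
  simp

theorem pvKeysA_nodup : pvKeysA.Nodup := by decide

-- keys of the found-entry list, in fixed order
theorem map_fst_filterMap (found : PySem.Dict String String) (keys : List String) :
    (keys.filterMap (fun key => (found.get? key).map (fun v => (key, v)))).map Prod.fst
      = keys.filter (fun key => (found.get? key).isSome) := by
  induction keys with
  | nil => rfl
  | cons k t ih =>
    simp only [List.filterMap_cons, List.filter_cons]
    cases h : found.get? k <;> simp [ih]

theorem pvRank_pairwise : pvKeysA.Pairwise (fun a b => pvRank.getD a 0 < pvRank.getD b 0) := by
  decide

theorem limit_headers_py_spec : Claim_equal_limit_headers_py := by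
  intro headers _
  unfold Spec_limit_headers_py limit_headers_py limit_headers_py_alt
  dsimp only
  set n : PySem.Dict String String :=
    headers.foldl (fun d p => d.insert (PySem.Str.lower p.1) p.2) PySem.Dict.empty with hn
  set found : PySem.Dict String String :=
    headers.foldl (fun d p =>
      let lk := PySem.Str.lower p.1
      if pvRank.contains lk then d.insert lk p.2 else d) PySem.Dict.empty with hfound
  -- the canonical result list: the found keys, in fixed-key order, with last-match values
  set L : List (String × String) :=
    pvKeysA.filterMap (fun key => (found.get? key).map (fun v => (key, v))) with hL
  have hfnd : found.keys.Nodup := by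
    rw [hfound]; exact nodup_keys_fold_filtered headers _ (by simp)
  -- found.get? agrees with n.get? on keys of pvKeysA
  have hagree : ∀ key ∈ pvKeysA, found.get? key = n.get? key := by
    intro key hkm
    rw [hfound, hn, get?_fold_filtered, get?_fold_insert_lower,
        if_pos ((contains_pvRank_iff key).mpr hkm)]
  -- membership in found.items ↔ membership in L
  have hmemL : ∀ p : String × String, p ∈ L ↔ p ∈ found.items := by
    intro p
    rw [hL]
    constructor
    · intro hp
      obtain ⟨key, hkm, hf⟩ := List.mem_filterMap.mp hp
      obtain ⟨v, hv, he⟩ := Option.map_eq_some_iff.mp hf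
      subst he
      exact (PySem.Dict.get?_eq_some_iff_mem_items found key v hfnd).mp hv
    · intro hp
      have hg : found.get? p.1 = some p.2 :=
        (PySem.Dict.get?_eq_some_iff_mem_items found p.1 p.2 hfnd).mpr (by simpa using hp)
      have hkm : p.1 ∈ pvKeysA := by
        by_contra hnm
        have hc : pvRank.contains p.1 = false := by
          cases h : pvRank.contains p.1
          · rfl
          · exact absurd ((contains_pvRank_iff p.1).mp h) hnm
        rw [hfound, get?_fold_filtered, hc] at hg
        simp at hg
      exact List.mem_filterMap.mpr ⟨p.1, hkm, by rw [hg]; rfl⟩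
  -- L is pairwise strictly increasing in rank
  have hpair : L.Pairwise (fun a b => pvRank.getD a.1 0 < pvRank.getD b.1 0) := by
    rw [hL]
    rw [List.pairwise_filterMap]
    refine pvRank_pairwise.imp_of_mem ?_
    intro a b _ _ hab p hp q hq
    obtain ⟨v, _, he⟩ := Option.map_eq_some_iff.mp hp
    obtain ⟨w, _, he'⟩ := Option.map_eq_some_iff.mp hq
    rw [← he, ← he']
    exact hab
  have hLnodup : L.Nodup := hpair.imp (fun {a b} h e => by rw [e] at h; exact lt_irrefl _ h)
  have hitemsnodup : found.items.Nodup :=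
    List.Nodup.of_map Prod.fst (by simpa [PySem.Dict.keys] using hfnd)
  have hperm : L.Perm found.items :=
    List.perm_of_nodup_nodup_toFinset_eq hLnodup hitemsnodup
      (Finset.ext fun p => by simp only [List.mem_toFinset]; exact hmemL p)
  have hsorted : PySem.List.sorted found.items (fun kv => pvRank.getD kv.1 0) = L :=
    PySem.List.sorted_eq_of_perm_of_pairwise_lt _ _ _ hperm hpair
  rw [hsorted]
  -- dict() of a pair list with distinct keys returns exactly that list
  have hfreshmap : (L.map Prod.fst).Nodup := by
    rw [hL, map_fst_filterMap]
    exact pvKeysA_nodup.filter _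
  have hofList : (PySem.Dict.ofList L).items = L := by
    show ((PySem.Dict.empty : PySem.Dict String String).update L).items = L
    unfold PySem.Dict.update
    have := PySem.Dict.items_foldl_insert_fresh L Prod.fst Prod.snd
      (PySem.Dict.empty : PySem.Dict String String) (by simp) hfreshmap
    simpa using this
  rw [hofList]
  -- finally: A's emission loop produces L
  rw [items_fold_emit n pvKeysA PySem.Dict.empty pvKeysA_nodup (by simp)]
  have hemp : (PySem.Dict.empty : PySem.Dict String String).items = [] := rfl
  rw [hemp, List.nil_append, hL]
  exact (List.filterMap_congr (fun key hkm => by rw [hagree key hkm])).symm
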